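-- pv_equiv track=rewrite | github.com/pypi-data/pypi-mirror-332 | packages/abctoolkit/abctoolkit-0.0.6.tar.gz/abctoolkit-0.0.6/src/abctoolkit/utils.py | merge_barline_and_bartext_dict
-- ===== SOURCE A (Python) =====
-- def merge_barline_and_bartext_dict(metadata_lines, prefix_dict, left_bar_line_dict, bar_text_dict, right_barline_dict):
--
--     # 重新组装，每列不要超过100字符
--     abc_lines = metadata_lines
--     for symbol in prefix_dict.keys():
--         abc_lines.append(symbol + '\n')
--         bar_index = 0
--         line_len = 0
--         line = prefix_dict[symbol] + left_bar_line_dict[symbol][0] + ' '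
--         while bar_index < len(bar_text_dict[symbol]):
--             bar = bar_text_dict[symbol][bar_index] + ' ' + \
--                   right_barline_dict[symbol][bar_index] + ' '
--             if line_len == 0 or line_len + len(bar) <= 100:
--                 line += bar
--                 line_len += len(bar)
--                 bar_index += 1
--             else:
--                 line += '\n'
--                 abc_lines.append(line)
--                 line = ' '
--                 line_len = 0
--         if line.strip() != '':
--             line += '\n'
--             abc_lines.append(line)
--
--     return abc_lines
-- ===== SOURCE B (Python) =====
-- def merge_barline_and_bartext_dict(metadata_lines, prefix_dict, left_bar_line_dict, bar_text_dict, right_barline_dict):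
--     # Pipeline: build the bar strings, greedily partition them into <=100-char
--     # groups, then render each group as one line (appends to metadata_lines like the original).
--     abc_lines = metadata_lines
--     for symbol in prefix_dict:
--         abc_lines.append(symbol + '\n')
--         texts = bar_text_dict[symbol]
--         bars = [texts[i] + ' ' + right_barline_dict[symbol][i] + ' ' for i in range(len(texts))]
--         groups = []
--         cur, run = [], 0
--         for bar in bars:
--             if run != 0 and run + len(bar) > 100:
--                 groups.append(cur)
--                 cur, run = [], 0
--             cur.append(bar)
--             run += len(bar)
--         if bars:
--             groups.append(cur)
--         head = prefix_dict[symbol] + left_bar_line_dict[symbol][0] + ' '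
--         if groups:
--             lines = [head + ''.join(groups[0])] + [' ' + ''.join(g) for g in groups[1:]]
--         else:
--             lines = [head]
--         abc_lines.extend(ln + '\n' for ln in lines[:-1])
--         if lines[-1].strip() != '':
--             abc_lines.append(lines[-1] + '\n')
--     return abc_lines
-- ===== Notes on version B (the rewrite author's own statement) =====
-- stated objective: alternative
-- what changed: A interleaves line building, length counting and output inside one while loop with a non-advancing wrap branch; B is a three-stage pipeline per voice: build the bar strings, greedily partition them into <=100-char groups, then render each group as one line.
import Mathlib
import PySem

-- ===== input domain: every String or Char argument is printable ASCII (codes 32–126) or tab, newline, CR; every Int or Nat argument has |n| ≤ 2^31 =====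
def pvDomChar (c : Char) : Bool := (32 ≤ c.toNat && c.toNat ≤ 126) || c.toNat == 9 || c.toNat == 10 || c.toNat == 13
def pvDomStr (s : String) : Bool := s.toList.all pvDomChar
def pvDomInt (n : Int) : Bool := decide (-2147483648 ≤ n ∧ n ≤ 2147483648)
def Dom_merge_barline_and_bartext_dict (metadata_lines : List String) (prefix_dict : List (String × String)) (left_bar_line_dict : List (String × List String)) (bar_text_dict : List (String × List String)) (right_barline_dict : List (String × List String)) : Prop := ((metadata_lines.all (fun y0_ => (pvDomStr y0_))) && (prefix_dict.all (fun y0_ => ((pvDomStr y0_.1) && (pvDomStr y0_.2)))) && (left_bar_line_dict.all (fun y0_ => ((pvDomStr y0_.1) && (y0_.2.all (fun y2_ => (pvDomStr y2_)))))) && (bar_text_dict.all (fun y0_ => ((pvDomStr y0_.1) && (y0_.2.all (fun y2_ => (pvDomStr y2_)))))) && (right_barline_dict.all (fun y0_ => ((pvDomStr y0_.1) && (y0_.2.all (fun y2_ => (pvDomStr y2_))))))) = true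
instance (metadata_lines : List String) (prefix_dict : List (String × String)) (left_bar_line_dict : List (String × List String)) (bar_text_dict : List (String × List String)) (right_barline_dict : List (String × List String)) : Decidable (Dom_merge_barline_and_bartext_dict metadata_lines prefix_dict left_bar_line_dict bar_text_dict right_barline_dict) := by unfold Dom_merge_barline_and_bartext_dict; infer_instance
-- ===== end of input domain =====

-- B re-renders each voice as a pipeline (bar list → greedy ≤100-char groups → lines) instead of A's
-- interleaved while loop; equivalence is about the RETURN value (both Pythons append to metadata_lines
-- in place in the same way). Objective: alternative decomposition, same cost.

-- ===== PORT A =====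
-- first-match lookup in the association list (Python dict[key]; Pre_ guarantees the key is present)
def pvLookup {α : Type} (d : List (String × α)) (k : String) (dflt : α) : α :=
  (List.lookup k d).getD dflt

-- bar_text_dict[symbol][bar_index] + ' ' + right_barline_dict[symbol][bar_index] + ' '
-- (indices are in range under Pre_, so List.getD is exact there)
def pvBar (texts rights : List String) (i : Nat) : List Char :=
  (texts.getD i "").toList ++ ' ' :: ((rights.getD i "").toList ++ [' '])

-- A's while loop: state (bar_index, line_len, line, abc_lines)
def pvLoopA (texts rights : List String) (n k lineLen : Nat) (line : List Char) (abc : List String) : List String × List Char :=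
  if h : k < n then
    let bar := pvBar texts rights k
    if hc : lineLen = 0 ∨ lineLen + bar.length ≤ 100 then
      pvLoopA texts rights n (k+1) (lineLen + bar.length) (line ++ bar) abc
    else
      pvLoopA texts rights n k 0 [' '] (abc ++ [String.ofList (line ++ ['\n'])])
  else (abc, line)
termination_by (n - k) * 2 + (if lineLen = 0 then 0 else 1)
decreasing_by
  · split_ifs <;> omega
  · have : ¬ lineLen = 0 := fun h0 => hc (Or.inl h0)
    split_ifs <;> omega

def merge_barline_and_bartext_dict (metadata_lines : List String) (prefix_dict : List (String × String)) (left_bar_line_dict : List (String × List String)) (bar_text_dict : List (String × List String)) (right_barline_dict : List (String × List String)) : List String :=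
  prefix_dict.foldl (fun abc p =>
    let symbol := p.1
    let abc := abc ++ [String.ofList (symbol.toList ++ ['\n'])]
    let texts := pvLookup bar_text_dict symbol []
    let line := (pvLookup prefix_dict symbol "").toList ++ (((pvLookup left_bar_line_dict symbol []).getD 0 "").toList ++ [' '])
    let r := pvLoopA texts (pvLookup right_barline_dict symbol []) texts.length 0 0 line abc
    if PySem.Chars.strip r.2 ≠ [] then r.1 ++ [String.ofList (r.2 ++ ['\n'])] else r.1) metadata_lines

-- ===== PORT B =====
-- bars = [texts[i] + ' ' + right_barline_dict[symbol][i] + ' ' for i in range(len(texts))]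
def pvBarsB (texts rights : List String) : List (List Char) :=
  (PySem.List.pyRange 0 (PySem.List.len texts) 1).map
    (fun i => (PySem.List.pyGetD texts i "").toList ++ ' ' :: ((PySem.List.pyGetD rights i "").toList ++ [' ']))

-- one step of B's grouping loop over (groups, cur, run)
def pvGroupStep (st : List (List (List Char)) × List (List Char) × Nat) (bar : List Char) :
    List (List (List Char)) × List (List Char) × Nat :=
  let st' := if st.2.2 ≠ 0 ∧ st.2.2 + bar.length > 100 then (st.1 ++ [st.2.1], ([] : List (List Char)), 0) else st
  (st'.1, st'.2.1 ++ [bar], st'.2.2 + bar.length)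

def pvGroups (bars : List (List Char)) : List (List (List Char)) :=
  let st := bars.foldl pvGroupStep ([], [], 0)
  if bars ≠ [] then st.1 ++ [st.2.1] else st.1

-- lines = [head + ''.join(groups[0])] + [' ' + ''.join(g) for g in groups[1:]]  (or [head])
def pvRender (head : List Char) (groups : List (List (List Char))) : List (List Char) :=
  match groups with
  | [] => [head]
  | g :: rest => (head ++ g.flatten) :: rest.map (fun h => ' ' :: h.flatten)

def merge_barline_and_bartext_dict_alt (metadata_lines : List String) (prefix_dict : List (String × String)) (left_bar_line_dict : List (String × List String)) (bar_text_dict : List (String × List String)) (right_barline_dict : List (String × List String)) : List String :=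
  prefix_dict.foldl (fun abc p =>
    let symbol := p.1
    let abc := abc ++ [String.ofList (symbol.toList ++ ['\n'])]
    let texts := pvLookup bar_text_dict symbol []
    let bars := pvBarsB texts (pvLookup right_barline_dict symbol [])
    let head := (pvLookup prefix_dict symbol "").toList ++ (((pvLookup left_bar_line_dict symbol []).getD 0 "").toList ++ [' '])
    let lines := pvRender head (pvGroups bars)
    let abc := abc ++ lines.dropLast.map (fun l => String.ofList (l ++ ['\n']))
    if PySem.Chars.strip (lines.getLastD []) ≠ [] then abc ++ [String.ofList (lines.getLastD [] ++ ['\n'])] else abc) metadata_lines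

-- ===== PRECONDITION & SPEC =====
-- Pre_ excludes exactly the inputs on which Python A raises: a prefix_dict key missing from
-- left_bar_line_dict / bar_text_dict (KeyError), an empty left_bar_line_dict entry (IndexError on [0]),
-- and, when the key has bars, a missing or too-short right_barline_dict entry (KeyError/IndexError).
def Pre_merge_barline_and_bartext_dict (metadata_lines : List String) (prefix_dict : List (String × String)) (left_bar_line_dict : List (String × List String)) (bar_text_dict : List (String × List String)) (right_barline_dict : List (String × List String)) : Prop :=
  ∀ p ∈ prefix_dict,
    (List.lookup p.1 left_bar_line_dict).isSome ∧
    (List.lookup p.1 left_bar_line_dict).getD [] ≠ [] ∧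
    (List.lookup p.1 bar_text_dict).isSome ∧
    ((List.lookup p.1 bar_text_dict).getD [] = [] ∨
      ((List.lookup p.1 right_barline_dict).isSome ∧
       ((List.lookup p.1 bar_text_dict).getD []).length ≤ ((List.lookup p.1 right_barline_dict).getD []).length))
instance (metadata_lines : List String) (prefix_dict : List (String × String)) (left_bar_line_dict : List (String × List String)) (bar_text_dict : List (String × List String)) (right_barline_dict : List (String × List String)) : Decidable (Pre_merge_barline_and_bartext_dict metadata_lines prefix_dict left_bar_line_dict bar_text_dict right_barline_dict) := by unfold Pre_merge_barline_and_bartext_dict; infer_instance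

def pvWitness_merge_barline_and_bartext_dict : List String × (List (String × String)) × (List (String × List String)) × (List (String × List String)) × (List (String × List String)) :=
  (["X:1\n"], [("V:1", "w ")], [("V:1", ["|:"])], [("V:1", ["ab", "cd"])], [("V:1", ["|", "|]"])])

def Spec_merge_barline_and_bartext_dict (metadata_lines : List String) (prefix_dict : List (String × String)) (left_bar_line_dict : List (String × List String)) (bar_text_dict : List (String × List String)) (right_barline_dict : List (String × List String)) (out : List String) : Prop := out = merge_barline_and_bartext_dict_alt metadata_lines prefix_dict left_bar_line_dict bar_text_dict right_barline_dict
instance (metadata_lines : List String) (prefix_dict : List (String × String)) (left_bar_line_dict : List (String × List String)) (bar_text_dict : List (String × List String)) (right_barline_dict : List (String × List String)) (out : List String) : Decidable (Spec_merge_barline_and_bartext_dict metadata_lines prefix_dict left_bar_line_dict bar_text_dict right_barline_dict out) := by unfold Spec_merge_barline_and_bartext_dict; infer_instance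

-- ===== CLAIM (what is proved, stated in full; the proofs are below) =====
def Claim_equal_merge_barline_and_bartext_dict : Prop := ∀ (metadata_lines : List String) (prefix_dict : List (String × String)) (left_bar_line_dict : List (String × List String)) (bar_text_dict : List (String × List String)) (right_barline_dict : List (String × List String)), Dom_merge_barline_and_bartext_dict metadata_lines prefix_dict left_bar_line_dict bar_text_dict right_barline_dict → Pre_merge_barline_and_bartext_dict metadata_lines prefix_dict left_bar_line_dict bar_text_dict right_barline_dict → Spec_merge_barline_and_bartext_dict metadata_lines prefix_dict left_bar_line_dict bar_text_dict right_barline_dict (merge_barline_and_bartext_dict metadata_lines prefix_dict left_bar_line_dict bar_text_dict right_barline_dict)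

-- ===== LEMMAS AND PROOFS =====

-- reference wrapping: the (un-terminated) physical lines A's loop produces from `line`/`run` and a bar list
def pvWrap (line : List Char) (run : Nat) : List (List Char) → List (List Char)
  | [] => [line]
  | bar :: rest =>
    if run = 0 ∨ run + bar.length ≤ 100 then pvWrap (line ++ bar) (run + bar.length) rest
    else line :: pvWrap (' ' :: bar) bar.length rest

-- how B renders a grouping-fold state, relative to the first line's prefix X
def pvSpecRender (X : List Char) (st : List (List (List Char)) × List (List Char) × Nat) : List (List Char) :=
  match st.1 with
  | [] => [X ++ st.2.1.flatten]
  | g :: rest => (X ++ g.flatten) :: (rest.map (fun h => ' ' :: h.flatten) ++ [' ' :: st.2.1.flatten])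

theorem pvWrap_ne_nil (bars : List (List Char)) (line : List Char) (run : Nat) : pvWrap line run bars ≠ [] := by
  induction bars generalizing line run with
  | nil => simp [pvWrap]
  | cons bar rest ih => simp only [pvWrap]; split_ifs <;> simp [ih]

theorem getLastD_cons_ne_nil {α : Type} (a : α) (l : List α) (d : α) (h : l ≠ []) :
    (a :: l).getLastD d = l.getLastD d := by
  cases l with
  | nil => exact absurd rfl h
  | cons b t => simp [List.getLastD]

theorem pvBarsB_eq (texts rights : List String) :
    pvBarsB texts rights = (List.range texts.length).map (pvBar texts rights) := by
  simp [pvBarsB, PySem.List.len, PySem.List.pyRange_zero_nat, List.map_map, Function.comp_def,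
    PySem.List.pyGetD_natCast, pvBar]

theorem pvGroups_acc (bars : List (List Char)) :
    ∀ gs cur run, bars.foldl pvGroupStep (gs, cur, run) =
      ((gs ++ (bars.foldl pvGroupStep ([], cur, run)).1, (bars.foldl pvGroupStep ([], cur, run)).2)) := by
  induction bars with
  | nil => intro gs cur run; simp
  | cons bar rest ih =>
    intro gs cur run
    simp only [List.foldl_cons, pvGroupStep]
    split_ifs with h
    · simp only [List.nil_append, Nat.zero_add]
      rw [ih (gs ++ [cur]) [bar] bar.length, ih [cur] [bar] bar.length]
      simp [List.append_assoc]
    · simp only []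
      exact ih gs (cur ++ [bar]) (run + bar.length)

theorem pvWrap_eq_fold (bars : List (List Char)) :
    ∀ X cur run, pvWrap (X ++ cur.flatten) run bars = pvSpecRender X (bars.foldl pvGroupStep ([], cur, run)) := by
  induction bars with
  | nil => intro X cur run; simp [pvWrap, pvSpecRender]
  | cons bar rest ih =>
    intro X cur run
    simp only [List.foldl_cons, pvGroupStep]
    by_cases hw : run = 0 ∨ run + bar.length ≤ 100
    · rw [if_neg (by omega : ¬ (run ≠ 0 ∧ run + bar.length > 100))]
      simp only [pvWrap, if_pos hw]
      have := ih X (cur ++ [bar]) (run + bar.length)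
      simpa [List.append_assoc] using this
    · rw [if_pos (by omega : (run ≠ 0 ∧ run + bar.length > 100))]
      simp only [pvWrap, if_neg hw]
      have h2 := ih [' '] [bar] bar.length
      simp only [List.flatten_cons, List.flatten_nil, List.append_nil, List.singleton_append,
        Nat.zero_add] at h2 ⊢
      rw [h2, show ([] ++ [cur] : List (List (List Char))) = [cur] from rfl,
        show ([] ++ [bar] : List (List Char)) = [bar] from rfl,
        pvGroups_acc rest [cur] [bar] bar.length]
      rcases hst : (rest.foldl pvGroupStep ([], [bar], bar.length)) with ⟨gs', cur', run'⟩
      cases gs' <;> simp [pvSpecRender]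

theorem pvRender_groups (head : List Char) (bars : List (List Char)) :
    pvRender head (pvGroups bars) = pvWrap head 0 bars := by
  cases bars with
  | nil => simp [pvGroups, pvRender, pvWrap]
  | cons b rest =>
    have hw := pvWrap_eq_fold (b :: rest) head [] 0
    simp only [List.flatten_nil, List.append_nil] at hw
    rw [hw]
    simp only [pvGroups, if_pos (by simp : (b :: rest : List (List Char)) ≠ [])]
    rcases hst : ((b :: rest).foldl pvGroupStep ([], [], 0)) with ⟨gs', cur', run'⟩
    cases gs' <;> simp [pvSpecRender, pvRender]

theorem pvLoopA_eq (texts rights : List String) (d : Nat) :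
    ∀ k lineLen line abc, texts.length - k ≤ d →
    pvLoopA texts rights texts.length k lineLen line abc =
      (abc ++ (pvWrap line lineLen (((List.range texts.length).map (pvBar texts rights)).drop k)).dropLast.map
          (fun l => String.ofList (l ++ ['\n'])),
       (pvWrap line lineLen (((List.range texts.length).map (pvBar texts rights)).drop k)).getLastD []) := by
  induction d with
  | zero =>
    intro k lineLen line abc hd
    have hk : ¬ k < texts.length := by omega
    rw [pvLoopA, dif_neg hk]
    rw [List.drop_eq_nil_of_le (by simpa using Nat.le_of_not_lt hk)]
    simp [pvWrap]
  | succ d ih =>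
    intro k lineLen line abc hd
    by_cases hk : k < texts.length
    · have hdrop : ((List.range texts.length).map (pvBar texts rights)).drop k =
          pvBar texts rights k :: ((List.range texts.length).map (pvBar texts rights)).drop (k+1) := by
        rw [List.drop_eq_getElem_cons (by simpa using hk)]
        simp
      rw [pvLoopA, dif_pos hk, hdrop]
      by_cases hc : lineLen = 0 ∨ lineLen + (pvBar texts rights k).length ≤ 100
      · rw [dif_pos hc, ih (k+1) _ _ _ (by omega)]
        rw [show pvWrap line lineLen (pvBar texts rights k :: ((List.range texts.length).map (pvBar texts rights)).drop (k+1)) = pvWrap (line ++ pvBar texts rights k) (lineLen + (pvBar texts rights k).length) (((List.range texts.length).map (pvBar texts rights)).drop (k+1)) from by rw [pvWrap, if_pos hc]]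
      · rw [dif_neg hc, pvLoopA, dif_pos hk, dif_pos (Or.inl rfl), ih (k+1) _ _ _ (by omega)]
        rw [show pvWrap line lineLen (pvBar texts rights k :: ((List.range texts.length).map (pvBar texts rights)).drop (k+1)) = line :: pvWrap (' ' :: pvBar texts rights k) (pvBar texts rights k).length (((List.range texts.length).map (pvBar texts rights)).drop (k+1)) from by rw [pvWrap, if_neg hc]]
        have hWne : pvWrap (' ' :: pvBar texts rights k) (pvBar texts rights k).length (((List.range texts.length).map (pvBar texts rights)).drop (k+1)) ≠ [] := pvWrap_ne_nil _ _ _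
        rw [List.dropLast_cons_of_ne_nil hWne, getLastD_cons_ne_nil _ _ _ hWne]
        simp [List.append_assoc]
    · rw [pvLoopA, dif_neg hk]
      rw [List.drop_eq_nil_of_le (by simpa using Nat.le_of_not_lt hk)]
      simp [pvWrap]

-- ===== VERDICT (by name: the statement is the Claim_ definition above) =====
theorem merge_barline_and_bartext_dict_spec : Claim_equal_merge_barline_and_bartext_dict := by
  intro metadata_lines prefix_dict left_bar_line_dict bar_text_dict right_barline_dict _ _
  unfold Spec_merge_barline_and_bartext_dict merge_barline_and_bartext_dict merge_barline_and_bartext_dict_alt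
  congr 1
  funext abc p
  dsimp only
  rw [pvLoopA_eq (pvLookup bar_text_dict p.1 []) (pvLookup right_barline_dict p.1 [])
      (pvLookup bar_text_dict p.1 []).length 0 0 _ _ (by omega)]
  rw [pvBarsB_eq, pvRender_groups]
  simp [List.append_assoc]
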